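-- pv_equiv track=rewrite | github.com/dobryi/Algorithms | searching/find_two_max.py | find_two_max
-- ===== SOURCE A (Python) =====
-- def find_two_max(seq):
--     max1, max2, n = seq[0], seq[0], len(seq)
--     for i in range(n):
--         if max1 < seq[i]:
--             max2 = max1
--             max1 = seq[i]
--         elif max2 < seq[i]:
--             max2 = seq[i]
--     return max1, max2
-- ===== SOURCE B (Python) =====
-- def find_two_max(seq):
--     s = sorted(seq, reverse=True)
--     return s[0], s[1 if len(s) > 1 else 0]
-- ===== Notes on version B (the rewrite author's own statement) =====
-- stated objective: simpler
-- what changed: Replaced the index-driven two-max scan carrying (max1, max2) state by sort-descending-then-take-the-first-two, which also fixes A's mis-initialised max2.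
-- intended difference: On lists of length >= 2 whose first element is strictly greater than every other element, A returns (head, head) because max2 is initialised to seq[0], while B returns (head, second-largest), the intended two largest values. — e.g. on find_two_max([5, 1]): A returns (5, 5), B returns (5, 1)
import Mathlib
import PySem

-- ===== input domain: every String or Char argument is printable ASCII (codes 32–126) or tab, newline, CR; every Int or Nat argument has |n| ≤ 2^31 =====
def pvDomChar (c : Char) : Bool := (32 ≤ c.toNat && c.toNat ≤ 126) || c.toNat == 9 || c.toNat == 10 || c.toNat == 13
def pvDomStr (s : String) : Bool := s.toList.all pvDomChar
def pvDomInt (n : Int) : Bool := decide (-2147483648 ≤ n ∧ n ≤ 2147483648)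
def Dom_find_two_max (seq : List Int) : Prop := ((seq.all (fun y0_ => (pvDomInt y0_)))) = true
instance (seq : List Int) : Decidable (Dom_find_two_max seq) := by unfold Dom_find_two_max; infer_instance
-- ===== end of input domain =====

-- B replaces A's index-loop two-max scan by sort-descending-then-take-two, and fixes
-- A's max2-initialisation slip (A returns (head, head) whenever the head strictly
-- dominates the tail); objective: simpler.

-- ===== PORT A =====
def find_two_max (seq : List Int) : Int × Int :=
  let max1 := PySem.List.pyGetD seq 0 0   -- seq[0]; Pre_ excludes the empty list where Python raises IndexError
  let max2 := PySem.List.pyGetD seq 0 0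
  let n : Int := PySem.List.len seq
  (PySem.List.pyRange 0 n 1).foldl
    (fun (st : Int × Int) i =>
      let v := PySem.List.pyGetD seq i 0
      if st.1 < v then (v, st.1)
      else if st.2 < v then (st.1, v)
      else st)
    (max1, max2)

-- ===== PORT B =====
def find_two_max_alt (seq : List Int) : Int × Int :=
  let s := PySem.List.sorted seq (fun x => x) true
  (PySem.List.pyGetD s 0 0,   -- s[0]; Pre_ excludes the empty list where Python raises IndexError
   PySem.List.pyGetD s (if 1 < PySem.List.len s then 1 else 0) 0)

-- ===== PRECONDITION & SPEC =====
-- Pre_ excludes exactly the empty list, on which both A and B raise IndexError.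
def Pre_find_two_max (seq : List Int) : Prop := seq ≠ []
instance (seq : List Int) : Decidable (Pre_find_two_max seq) := by unfold Pre_find_two_max; infer_instance
def pvWitness_find_two_max : List Int := [3, 7, 7]

-- On lists of length ≥ 2 whose first element is strictly greater than every other
-- element, A returns (head, head) because max2 is mis-initialised to seq[0], while B
-- returns (head, second-largest), the intended "two largest values" answer.
def D_find_two_max (seq : List Int) : Prop :=
  2 ≤ seq.length ∧ ∀ y ∈ seq.tail, y < seq.headI
instance (seq : List Int) : Decidable (D_find_two_max seq) := by unfold D_find_two_max; infer_instance

def Spec_find_two_max (seq : List Int) (out : Int × Int) : Prop :=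
  ¬ D_find_two_max seq → out = find_two_max_alt seq
instance (seq : List Int) (out : Int × Int) : Decidable (Spec_find_two_max seq out) := by unfold Spec_find_two_max; infer_instance

def pvDiffWitness_find_two_max : List Int := [5, 1]
def pvDiffWitnessOut_find_two_max : (Int × Int) × (Int × Int) := ((5, 5), (5, 1))

-- ===== CLAIM (what is proved, stated in full; the proofs are below) =====
def Claim_unchanged_find_two_max : Prop := ∀ (seq : List Int), Dom_find_two_max seq → Pre_find_two_max seq → Spec_find_two_max seq (find_two_max seq)
def Claim_changed_find_two_max : Prop := Dom_find_two_max (pvDiffWitness_find_two_max) ∧ Pre_find_two_max (pvDiffWitness_find_two_max) ∧ D_find_two_max (pvDiffWitness_find_two_max) ∧ find_two_max (pvDiffWitness_find_two_max) = pvDiffWitnessOut_find_two_max.1 ∧ find_two_max_alt (pvDiffWitness_find_two_max) = pvDiffWitnessOut_find_two_max.2 ∧ pvDiffWitnessOut_find_two_max.1 ≠ pvDiffWitnessOut_find_two_max.2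
def Claim_exact_find_two_max : Prop := ∀ (seq : List Int), Dom_find_two_max seq → Pre_find_two_max seq → D_find_two_max seq → find_two_max seq ≠ find_two_max_alt seq

-- ===== LEMMAS AND PROOFS =====

-- A's loop body as a named step function.
def pvStep (st : Int × Int) (v : Int) : Int × Int :=
  if st.1 < v then (v, st.1) else if st.2 < v then (st.1, v) else st

-- "p is the top-two of the multiset L" (largest and second largest, with multiplicity).
def TopTwo (p : Int × Int) (L : List Int) : Prop :=
  p.2 ≤ p.1 ∧ ∃ r, L.Perm (p.1 :: p.2 :: r) ∧ ∀ y ∈ r, y ≤ p.2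

lemma pvPermRot (c a b : Int) (l : List Int) : (c :: a :: b :: l).Perm (a :: b :: c :: l) :=
  (List.Perm.swap a c (b :: l)).trans (List.Perm.cons a (List.Perm.swap b c l))

lemma topTwo_perm {p : Int × Int} {L L' : List Int} (h : L.Perm L') (ht : TopTwo p L) :
    TopTwo p L' := by
  obtain ⟨h1, r, hp, hr⟩ := ht
  exact ⟨h1, r, h.symm.trans hp, hr⟩

lemma topTwo_cons {p : Int × Int} {L : List Int} {c : Int} (ht : TopTwo p L) (hc : c ≤ p.2) :
    TopTwo p (c :: L) := by
  obtain ⟨h1, r, hp, hr⟩ := ht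
  refine ⟨h1, c :: r, (hp.cons c).trans (pvPermRot c p.1 p.2 r), ?_⟩
  intro y hy
  rw [List.mem_cons] at hy
  rcases hy with h | h
  · exact h ▸ hc
  · exact hr y h

lemma foldl_pvStep_snd_le (l : List Int) : ∀ a b : Int, b ≤ a → b ≤ (l.foldl pvStep (a, b)).2 := by
  induction l with
  | nil => intro a b h; exact le_refl b
  | cons v l ih =>
    intro a b h
    simp only [List.foldl_cons, pvStep]
    split_ifs with h1 h2
    · exact le_trans h (ih v a (le_of_lt h1))
    · exact le_trans (le_of_lt h2) (ih a v (le_of_not_gt h1))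
    · exact ih a b h

lemma foldl_pvStep_topTwo (l : List Int) : ∀ a b : Int, b ≤ a →
    TopTwo (l.foldl pvStep (a, b)) (a :: b :: l) := by
  induction l with
  | nil =>
    intro a b h
    exact ⟨h, [], List.Perm.refl _, by intro y hy; cases hy⟩
  | cons v l ih =>
    intro a b h
    simp only [List.foldl_cons, pvStep]
    split_ifs with h1 h2
    · -- a < v: state becomes (v, a), b is dropped
      have hb : b ≤ (l.foldl pvStep (v, a)).2 :=
        le_trans h (foldl_pvStep_snd_le l v a (le_of_lt h1))
      refine topTwo_perm ?_ (topTwo_cons (ih v a (le_of_lt h1)) hb)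
      exact (pvPermRot b v a l).trans (pvPermRot v a b l)
    · -- b < v ≤ a: state becomes (a, v), b is dropped
      have hv : v ≤ (l.foldl pvStep (a, v)).2 :=
        foldl_pvStep_snd_le l a v (le_of_not_gt h1)
      refine topTwo_perm ?_ (topTwo_cons (ih a v (le_of_not_gt h1)) (le_trans (le_of_lt h2) hv))
      exact List.Perm.swap a b (v :: l)
    · -- v ≤ b: state unchanged, v is dropped
      have hb : b ≤ (l.foldl pvStep (a, b)).2 := foldl_pvStep_snd_le l a b h
      refine topTwo_perm ?_ (topTwo_cons (ih a b h) (le_trans (le_of_not_gt h2) hb))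
      exact pvPermRot v a b l

lemma topTwo_max {p : Int × Int} {L : List Int} (ht : TopTwo p L) :
    p.1 ∈ L ∧ ∀ y ∈ L, y ≤ p.1 := by
  obtain ⟨h1, r, hp, hr⟩ := ht
  constructor
  · exact hp.mem_iff.2 (by simp)
  · intro y hy
    have hm : y ∈ p.1 :: p.2 :: r := hp.mem_iff.1 hy
    simp only [List.mem_cons] at hm
    rcases hm with h | h | h
    · exact le_of_eq h
    · exact h ▸ h1
    · exact le_trans (hr y h) h1

lemma topTwo_unique {p q : Int × Int} {L : List Int} (hp : TopTwo p L) (hq : TopTwo q L) :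
    p = q := by
  have h1 : p.1 = q.1 :=
    le_antisymm ((topTwo_max hq).2 _ (topTwo_max hp).1) ((topTwo_max hp).2 _ (topTwo_max hq).1)
  obtain ⟨hple, r, hpp, hpr⟩ := hp
  obtain ⟨hqle, r', hqp, hqr⟩ := hq
  rw [← h1] at hqp
  have hperm : (p.2 :: r).Perm (q.2 :: r') := (hpp.symm.trans hqp).cons_inv
  have h2 : p.2 = q.2 := by
    have hq2 : q.2 ∈ p.2 :: r := hperm.mem_iff.2 List.mem_cons_self
    have hp2 : p.2 ∈ q.2 :: r' := hperm.mem_iff.1 List.mem_cons_self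
    simp only [List.mem_cons] at hq2 hp2
    rcases hq2 with h | h
    · exact h.symm
    · rcases hp2 with h' | h'
      · exact h'
      · exact le_antisymm (hqr _ h') (hpr _ h)
  exact Prod.ext h1 h2

-- The characterisation of port A's value on a nonempty list.
lemma find_two_max_eq_foldl (x : Int) (t : List Int) :
    find_two_max (x :: t) = t.foldl pvStep (x, x) := by
  show (PySem.List.pyRange 0 (PySem.List.len (x :: t)) 1).foldl
      (fun acc j => pvStep acc (PySem.List.pyGetD (x :: t) j 0))
      (PySem.List.pyGetD (x :: t) 0 0, PySem.List.pyGetD (x :: t) 0 0) = t.foldl pvStep (x, x)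
  have hget : PySem.List.pyGetD (x :: t) 0 0 = x := by
    simp [PySem.List.pyGetD, PySem.List.pyGet?, PySem.List.pyIdx?]
  have hlen : PySem.List.len (x :: t) = ((x :: t).length : Int) := by
    simp [PySem.List.len]
  rw [hget, hlen, PySem.List.foldl_pyRange_zero_pyGetD' (x :: t) 0 pvStep (x, x)]
  simp only [List.foldl_cons]
  have : pvStep (x, x) x = (x, x) := by simp [pvStep]
  rw [this]

lemma find_two_max_topTwo (x : Int) (t : List Int) :
    TopTwo (find_two_max (x :: t)) (x :: x :: t) := by
  rw [find_two_max_eq_foldl]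
  exact foldl_pvStep_topTwo t x x (le_refl x)

-- The characterisation of port B's value when the sort has length ≥ 2.
lemma find_two_max_alt_eq (seq : List Int) (s0 s1 : Int) (r : List Int)
    (hs : PySem.List.sorted seq (fun x => x) true = s0 :: s1 :: r) :
    find_two_max_alt seq = (s0, s1) := by
  show (PySem.List.pyGetD (PySem.List.sorted seq (fun x => x) true) 0 0,
        PySem.List.pyGetD (PySem.List.sorted seq (fun x => x) true)
          (if 1 < PySem.List.len (PySem.List.sorted seq (fun x => x) true) then 1 else 0) 0) = (s0, s1)
  rw [hs]
  have hlen : PySem.List.len (s0 :: s1 :: r) = ((s0 :: s1 :: r).length : Int) := by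
    simp [PySem.List.len]
  rw [hlen]
  have hif : (if (1 : Int) < (((s0 :: s1 :: r).length : Nat) : Int) then (1 : Int) else 0) = 1 := by
    rw [if_pos]; simp only [List.length_cons]; push_cast; omega
  rw [hif]
  have hg0 : (0 : Int) ≤ (r.length : Int) + 1 := by omega
  simp [pysem, PySem.List.pyGetD, PySem.List.pyGet?, PySem.List.pyIdx?, hg0]

lemma sorted_two_bounds (seq : List Int) (s0 s1 : Int) (r : List Int)
    (hs : PySem.List.sorted seq (fun x => x) true = s0 :: s1 :: r) :
    s1 ≤ s0 ∧ ∀ v ∈ r, v ≤ s1 := by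
  have hpair := PySem.List.sorted_pairwise_rev seq (fun x => x)
  rw [hs] at hpair
  rcases List.pairwise_cons.1 hpair with ⟨h0, hpair1⟩
  rcases List.pairwise_cons.1 hpair1 with ⟨h1, _⟩
  exact ⟨h0 s1 (by simp), h1⟩

lemma sorted_topTwo (seq : List Int) (s0 s1 : Int) (r : List Int)
    (hs : PySem.List.sorted seq (fun x => x) true = s0 :: s1 :: r) :
    TopTwo (s0, s1) seq := by
  have hperm : (PySem.List.sorted seq (fun x => x) true).Perm seq := PySem.List.sorted_perm _ _ _
  have hpair := PySem.List.sorted_pairwise_rev seq (fun x => x)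
  rw [hs] at hperm hpair
  rcases List.pairwise_cons.1 hpair with ⟨h0, hpair1⟩
  rcases List.pairwise_cons.1 hpair1 with ⟨h1, _⟩
  exact ⟨h0 s1 (by simp), r, hperm.symm, h1⟩

lemma sorted_two_exists (x y : Int) (t : List Int) :
    ∃ s0 s1 r, PySem.List.sorted (x :: y :: t) (fun v => v) true = s0 :: s1 :: r := by
  have hlen : (PySem.List.sorted (x :: y :: t) (fun v => v) true).length = (x :: y :: t).length :=
    (PySem.List.sorted_perm _ _ _).length_eq
  match hm : PySem.List.sorted (x :: y :: t) (fun v => v) true with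
  | [] => rw [hm] at hlen; simp at hlen
  | [a] => rw [hm] at hlen; simp at hlen
  | a :: b :: r => exact ⟨a, b, r, rfl⟩

-- ===== VERDICT (by name: the statement is the Claim_ definition above) =====
theorem find_two_max_spec : Claim_unchanged_find_two_max := by
  intro seq hdom hpre hnd
  rcases seq with _ | ⟨x, _ | ⟨y, t⟩⟩
  · exact absurd rfl hpre
  · -- singleton: both sides are (x, x)
    have hs : PySem.List.sorted [x] (fun v => v) true = [x] :=
      List.perm_singleton.1 (PySem.List.sorted_perm _ _ _)
    show find_two_max [x] = find_two_max_alt [x]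
    rw [find_two_max_eq_foldl]
    show (x, x) = find_two_max_alt [x]
    show (x, x) = (PySem.List.pyGetD (PySem.List.sorted [x] (fun v => v) true) 0 0,
        PySem.List.pyGetD (PySem.List.sorted [x] (fun v => v) true)
          (if 1 < PySem.List.len (PySem.List.sorted [x] (fun v => v) true) then 1 else 0) 0)
    rw [hs]
    simp [PySem.List.len, PySem.List.pyGetD, PySem.List.pyGet?, PySem.List.pyIdx?]
  · -- length ≥ 2: since ¬D, some tail element is ≥ x
    have hex : ∃ z ∈ y :: t, x ≤ z := by
      by_contra hc
      push_neg at hc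
      exact hnd ⟨by simp, by intro v hv; simp only [List.headI]; exact hc v (by simpa using hv)⟩
    obtain ⟨z, hz, hxz⟩ := hex
    obtain ⟨s0, s1, r, hs⟩ := sorted_two_exists x y t
    have htB : TopTwo (s0, s1) (x :: y :: t) := sorted_topTwo _ _ _ _ hs
    obtain ⟨hs10, hrb⟩ := sorted_two_bounds _ _ _ _ hs
    -- x ≤ s1 by counting elements ≥ x
    have hxs1 : x ≤ s1 := by
      by_contra hlt
      push_neg at hlt
      have hperm : (s0 :: s1 :: r).Perm (x :: y :: t) := by
        rw [← hs]; exact PySem.List.sorted_perm _ _ _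
      have hcnt := hperm.countP_eq (fun v => decide (x ≤ v))
      have h2 : 2 ≤ (x :: y :: t).countP (fun v => decide (x ≤ v)) := by
        have hz2 : 0 < (y :: t).countP (fun v => decide (x ≤ v)) :=
          List.countP_pos_iff.2 ⟨z, hz, by simpa using hxz⟩
        have hx : (x :: y :: t).countP (fun v => decide (x ≤ v))
            = (y :: t).countP (fun v => decide (x ≤ v)) + 1 := by
          simp [List.countP_cons]
        omega
      have hsmall : (s1 :: r).countP (fun v => decide (x ≤ v)) = 0 := by
        rw [List.countP_eq_zero]
        intro v hv
        simp only [List.mem_cons] at hv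
        simp only [decide_eq_true_eq]
        rcases hv with h | h
        · omega
        · have := hrb v h; omega
      rw [List.countP_cons, hsmall] at hcnt
      split_ifs at hcnt <;> omega
    have htA := find_two_max_topTwo x (y :: t)
    have htB' : TopTwo (s0, s1) (x :: x :: y :: t) := topTwo_cons htB hxs1
    show find_two_max (x :: y :: t) = find_two_max_alt (x :: y :: t)
    rw [find_two_max_alt_eq _ _ _ _ hs]
    exact topTwo_unique htA htB'

theorem find_two_max_changed : Claim_changed_find_two_max := by
  unfold Claim_changed_find_two_max; decide

theorem find_two_max_tight : Claim_exact_find_two_max := by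
  intro seq hdom hpre hd
  obtain ⟨hlen, hall⟩ := hd
  rcases seq with _ | ⟨x, _ | ⟨y, t⟩⟩
  · exact absurd rfl hpre
  · simp at hlen
  · simp only [List.tail_cons, List.headI] at hall
    -- A = (x, x)
    have htA := find_two_max_topTwo x (y :: t)
    have htxx : TopTwo (x, x) (x :: x :: y :: t) := by
      refine ⟨le_refl x, y :: t, List.Perm.refl _, ?_⟩
      intro v hv; exact le_of_lt (hall v hv)
    have hA : find_two_max (x :: y :: t) = (x, x) := topTwo_unique htA htxx
    -- B = (s0, s1) with s1 < x
    obtain ⟨s0, s1, r, hs⟩ := sorted_two_exists x y t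
    have hB : find_two_max_alt (x :: y :: t) = (s0, s1) := find_two_max_alt_eq _ _ _ _ hs
    have htB : TopTwo (s0, s1) (x :: y :: t) := sorted_topTwo _ _ _ _ hs
    have hperm : (s0 :: s1 :: r).Perm (x :: y :: t) := by
      rw [← hs]; exact PySem.List.sorted_perm _ _ _
    have hs1 : s1 < x := by
      have hcnt := hperm.countP_eq (fun v => decide (x ≤ v))
      have h1 : (x :: y :: t).countP (fun v => decide (x ≤ v)) = 1 := by
        have h0 : (y :: t).countP (fun v => decide (x ≤ v)) = 0 := by
          rw [List.countP_eq_zero]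
          intro v hv
          simp only [decide_eq_true_eq]
          exact not_le_of_gt (hall v hv)
        simp [h0]
      by_contra hge
      push_neg at hge
      have hs0 : x ≤ s0 := le_trans hge htB.1
      rw [List.countP_cons, List.countP_cons] at hcnt
      simp only [decide_eq_true_eq] at hcnt
      rw [if_pos hge, if_pos hs0] at hcnt
      omega
    rw [hA, hB]
    intro hcontra
    have h2 := congrArg Prod.snd hcontra
    simp at h2
    omega
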